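-- pv_equiv track=rewrite | github.com/dorazhao99/modelgardens | src/Clusterer.py | _merge_observations
-- ===== SOURCE A (Python) =====
-- from typing import List, Dict
--
-- def _merge_observations(items, scores, threshold=8) -> List[dict]:
--     n = len(items)
--     parent = list(range(n))
--
--     def find(x):
--         if parent[x] != x:
--             parent[x] = find(parent[x])
--         return parent[x]
--
--     def union(x, y):
--         parent[find(x)] = find(y)
--
--     # Merge items with scores >= threshold
--     for (i, j), score in scores.items():
--         if score >= threshold:
--             union(i, j)
--
--     # Group items by their root parent
--     clusters = {}
--     for i in range(n):
--         root = find(i)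
--         clusters.setdefault(root, set()).add(items[i])
--
--     return list(clusters.values())
-- ===== SOURCE B (Python) =====
-- def _merge_observations(items, scores, threshold=8):
--     n = len(items)
--     # one label per index; merging relabels the whole class in one pass
--     labels = list(range(n))
--     for (i, j), score in scores.items():
--         if score >= threshold:
--             a, b = labels[i], labels[j]
--             if a != b:
--                 labels = [b if l == a else l for l in labels]
--     clusters = {}
--     for i, lab in enumerate(labels):
--         clusters.setdefault(lab, set()).add(items[i])
--     return list(clusters.values())
-- ===== Notes on version B (the rewrite author's own statement) =====
-- stated objective: simpler
-- what changed: Replaces the recursive path-compressing union-find (find/union on a parent array) by direct label propagation: each merge relabels the losing class in one list pass, so no recursion and no mutable parent forest; grouping then reads the final labels directly.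
import Mathlib
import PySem

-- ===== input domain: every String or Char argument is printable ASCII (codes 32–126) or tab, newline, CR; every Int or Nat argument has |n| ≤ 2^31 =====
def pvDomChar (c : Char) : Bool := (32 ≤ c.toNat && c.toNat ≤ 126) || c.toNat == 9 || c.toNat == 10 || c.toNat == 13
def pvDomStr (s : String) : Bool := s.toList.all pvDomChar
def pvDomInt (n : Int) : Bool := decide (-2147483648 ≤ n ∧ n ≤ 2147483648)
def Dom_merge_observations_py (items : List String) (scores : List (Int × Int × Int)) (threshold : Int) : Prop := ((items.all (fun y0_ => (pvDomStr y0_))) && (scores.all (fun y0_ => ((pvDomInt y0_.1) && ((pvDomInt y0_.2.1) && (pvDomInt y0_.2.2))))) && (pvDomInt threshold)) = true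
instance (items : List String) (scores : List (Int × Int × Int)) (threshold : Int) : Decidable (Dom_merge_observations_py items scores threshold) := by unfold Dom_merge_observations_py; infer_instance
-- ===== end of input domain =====

-- B replaces the recursive path-compressing union-find by one-pass label propagation (same clusters, no recursion); objective: simpler.
-- ===== PORT A =====
-- find(x) with path compression: reads parent[x]; if not a self-loop, recurses on the
-- value and writes the root back into parent[x], returning it. Python's recursion has no
-- fuel; on the union-find states reached here chains are acyclic, so fuel length+1 always
-- suffices (proved below); the 0-fuel branch is never taken under Pre_.
def pvFindA (fuel : Nat) (parent : List Int) (x : Int) : List Int × Int :=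
  match fuel with
  | 0 => (parent, x)
  | f + 1 =>
    let px := PySem.List.pyGetD parent x x
    if px = x then (parent, px)
    else
      let res := pvFindA f parent px
      -- parent[x] = find(parent[x]); return parent[x]  (the cell just written, i.e. res.2)
      (PySem.List.pySetD res.1 x res.2, res.2)

-- union(x, y): parent[find(x)] = find(y); Python evaluates the RHS find(y) first.
def pvUnionA (parent : List Int) (x y : Int) : List Int :=
  let ry := pvFindA (parent.length + 1) parent y
  let rx := pvFindA (parent.length + 1) ry.1 x
  PySem.List.pySetD rx.1 rx.2 ry.2

def merge_observations_py (items : List String) (scores : List (Int × Int × Int)) (threshold : Int) : List (List String) :=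
  let n : Int := PySem.List.len items
  let parent : List Int := PySem.List.pyRange 0 n 1
  let parent := scores.foldl (fun pf e => if threshold ≤ e.2.2 then pvUnionA pf e.1 e.2.1 else pf) parent
  let st := (PySem.List.pyRange 0 n 1).foldl
    (fun (st : List Int × PySem.Dict Int (PySem.Set String)) i =>
      let fr := pvFindA (st.1.length + 1) st.1 i
      -- clusters.setdefault(root, set()).add(items[i])
      (fr.1, st.2.modify fr.2 PySem.Set.empty (fun s => PySem.Set.add s (PySem.List.pyGetD items i ""))))
    (parent, PySem.Dict.empty)
  st.2.values

-- ===== PORT B =====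
def merge_observations_py_alt (items : List String) (scores : List (Int × Int × Int)) (threshold : Int) : List (List String) :=
  let n : Int := PySem.List.len items
  let labels : List Int := PySem.List.pyRange 0 n 1
  let labels := scores.foldl
    (fun ls e =>
      if threshold ≤ e.2.2 then
        let a := PySem.List.pyGetD ls e.1 0
        let b := PySem.List.pyGetD ls e.2.1 0
        if a ≠ b then ls.map (fun l => if l = a then b else l) else ls
      else ls)
    labels
  let clusters := (PySem.List.enumerate labels 0).foldl
    (fun (d : PySem.Dict Int (PySem.Set String)) p =>
      d.modify p.2 PySem.Set.empty (fun s => PySem.Set.add s (PySem.List.pyGetD items p.1 "")))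
    PySem.Dict.empty
  clusters.values

-- ===== PRECONDITION & SPEC =====
-- Pre_ excludes exactly the inputs on which A raises IndexError: a score entry at or
-- above the threshold whose endpoint is not a valid Python index into items.
def Pre_merge_observations_py (items : List String) (scores : List (Int × Int × Int)) (threshold : Int) : Prop :=
  ∀ e ∈ scores, threshold ≤ e.2.2 →
    PySem.Raise.InRange items.length e.1 ∧ PySem.Raise.InRange items.length e.2.1
instance (items : List String) (scores : List (Int × Int × Int)) (threshold : Int) : Decidable (Pre_merge_observations_py items scores threshold) := by unfold Pre_merge_observations_py; infer_instance

def pvWitness_merge_observations_py : List String × (List (Int × Int × Int)) × Int :=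
  (["a", "b", "c"], [(0, 1, 9), (1, 2, 3)], 8)

def Spec_merge_observations_py (items : List String) (scores : List (Int × Int × Int)) (threshold : Int) (out : List (List String)) : Prop := out = merge_observations_py_alt items scores threshold
instance (items : List String) (scores : List (Int × Int × Int)) (threshold : Int) (out : List (List String)) : Decidable (Spec_merge_observations_py items scores threshold out) := by unfold Spec_merge_observations_py; infer_instance

-- ===== CLAIM (what is proved, stated in full; the proofs are below) =====
def Claim_equal_merge_observations_py : Prop := ∀ (items : List String) (scores : List (Int × Int × Int)) (threshold : Int), Dom_merge_observations_py items scores threshold → Pre_merge_observations_py items scores threshold → Spec_merge_observations_py items scores threshold (merge_observations_py items scores threshold)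

-- ===== LEMMAS AND PROOFS =====

-- ---- proof-side view of the union-find parent array ----
def pvStep (pf : List Int) (x : Int) : Int := PySem.List.pyGetD pf x x

def pvIter (pf : List Int) (x : Int) : Nat → Int
  | 0 => x
  | f + 1 => if pvStep pf x = x then x else pvIter pf (pvStep pf x) f

def pvRt (pf : List Int) (x : Int) : Int := pvIter pf x pf.length

lemma pvIter_succ (pf : List Int) (x : Int) (f : Nat) :
    pvIter pf x (f + 1) = if pvStep pf x = x then x else pvIter pf (pvStep pf x) f := rfl

def pvBnd (pf : List Int) : Prop := ∀ v ∈ pf, 0 ≤ v ∧ v < pf.length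

def pvWF (pf : List Int) : Prop :=
  pvBnd pf ∧ ∀ k : Int, 0 ≤ k → k < pf.length →
    ∃ f, pvStep pf (pvIter pf k f) = pvIter pf k f

lemma pvStep_mem (pf : List Int) (x : Int) (h : PySem.Raise.InRange pf.length x) :
    pvStep pf x ∈ pf := PySem.List.pyGetD_mem pf x h

lemma pvStep_range (pf : List Int) (x : Int) (hb : pvBnd pf)
    (h0 : -(pf.length : Int) ≤ x) (h1 : x < pf.length) :
    0 ≤ pvStep pf x ∧ pvStep pf x < pf.length := by
  have hm := pvStep_mem pf x ⟨h0, h1⟩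
  exact hb _ hm

lemma pvStep_neg (pf : List Int) (x : Int) (h0 : -(pf.length : Int) ≤ x) (h1 : x < 0) :
    pvStep pf x = pvStep pf (x + pf.length) := by
  have h2 : x + (pf.length : Int) < pf.length := by omega
  have h3 : 0 ≤ x + (pf.length : Int) := by omega
  simp only [pvStep, PySem.List.pyGetD, PySem.List.pyGet?, PySem.List.pyIdx?]
  rw [if_neg (by omega), if_pos (by omega), if_pos (by omega), if_pos (by omega)]
  have he : pf.length - (-x).toNat = (x + (pf.length : Int)).toNat := by omega
  rw [he]
  have hlt : (x + (pf.length : Int)).toNat < pf.length := by omega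
  simp [List.getElem?_eq_getElem hlt]

lemma pvStep_set (pf : List Int) (c : Nat) (r k : Int) (_hc : c < pf.length)
    (hk : 0 ≤ k) (hk2 : k < pf.length) :
    pvStep (pf.set c r) k = if k = (c : Int) then r else pvStep pf k := by
  have hk3 : k.toNat < pf.length := by omega
  have hk4 : k.toNat < (pf.set c r).length := by simpa using hk3
  rw [pvStep, PySem.List.pyGetD_eq_getElem _ _ hk (by simpa using hk2),
    pvStep, PySem.List.pyGetD_eq_getElem _ _ hk hk2]
  rw [List.getElem_set]
  by_cases hkc : k = (c : Int)
  · rw [if_pos hkc, if_pos (by omega : c = k.toNat)]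
  · rw [if_neg hkc, if_neg (by omega : ¬ c = k.toNat)]

lemma pvIter_fix (pf : List Int) (r : Int) (h : pvStep pf r = r) :
    ∀ f, pvIter pf r f = r := by
  intro f
  induction f with
  | zero => rfl
  | succ f ih => simp [pvIter, h]

lemma pvIter_add (pf : List Int) : ∀ (s t : Nat) (x : Int),
    pvIter pf x (s + t) = pvIter pf (pvIter pf x s) t := by
  intro s
  induction s with
  | zero => intro t x; rw [Nat.zero_add]; rfl
  | succ s ih =>
    intro t x
    have hst : s + 1 + t = (s + t) + 1 := by omega
    rw [hst]
    by_cases hx : pvStep pf x = x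
    · rw [show pvIter pf x (s + t + 1) = x from by simp [pvIter, hx],
        show pvIter pf x (s + 1) = x from by simp [pvIter, hx]]
      exact (pvIter_fix pf x hx t).symm
    · rw [show pvIter pf x (s + t + 1) = pvIter pf (pvStep pf x) (s + t) from by
        simp [pvIter, hx],
        show pvIter pf x (s + 1) = pvIter pf (pvStep pf x) s from by simp [pvIter, hx]]
      exact ih t (pvStep pf x)

lemma pvIter_stab (pf : List Int) (x : Int) (f g : Nat)
    (h : pvStep pf (pvIter pf x f) = pvIter pf x f) (hfg : f ≤ g) :
    pvIter pf x g = pvIter pf x f := by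
  have : g = f + (g - f) := by omega
  rw [this, pvIter_add]
  exact pvIter_fix pf _ h _

lemma pvIter_unique (pf : List Int) (x : Int) (f g : Nat)
    (hf : pvStep pf (pvIter pf x f) = pvIter pf x f)
    (hg : pvStep pf (pvIter pf x g) = pvIter pf x g) :
    pvIter pf x f = pvIter pf x g := by
  rcases le_total f g with hle | hle
  · exact (pvIter_stab pf x f g hf hle).symm
  · exact pvIter_stab pf x g f hg hle

lemma pvIter_range (pf : List Int) (hb : pvBnd pf) :
    ∀ (f : Nat) (y : Int), 0 ≤ y → y < pf.length →
      0 ≤ pvIter pf y f ∧ pvIter pf y f < pf.length := by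
  intro f
  induction f with
  | zero => intro y h0 h1; exact ⟨h0, h1⟩
  | succ f ih =>
    intro y h0 h1
    by_cases hy : pvStep pf y = y
    · simpa [pvIter, hy] using ⟨h0, h1⟩
    · have hr := pvStep_range pf y hb (by omega) h1
      simpa [pvIter, hy] using ih (pvStep pf y) hr.1 hr.2

lemma pvIter_periodic (pf : List Int) (z : Int) (p : Nat) (hp : pvIter pf z p = z) :
    ∀ (q r : Nat), pvIter pf z (q * p + r) = pvIter pf z r := by
  intro q
  induction q with
  | zero => intro r; simp
  | succ q ih =>
    intro r
    have : (q + 1) * p + r = p + (q * p + r) := by ring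
    rw [this, pvIter_add, hp, ih r]

-- pigeonhole: an eventually-fixed chain from a valid start is fixed within length-1 steps
lemma pvReach_bound (pf : List Int) (y : Int) (hb : pvBnd pf)
    (h0 : 0 ≤ y) (h1 : y < pf.length)
    (h : ∃ f, pvStep pf (pvIter pf y f) = pvIter pf y f) :
    pvStep pf (pvIter pf y (pf.length - 1)) = pvIter pf y (pf.length - 1) := by
  classical
  let P : Nat → Prop := fun f => pvStep pf (pvIter pf y f) = pvIter pf y f
  have hP : ∃ f, P f := h
  let d := Nat.find hP
  have hd : P d := Nat.find_spec hP
  have hmin : ∀ m, m < d → ¬ P m := fun m hm => Nat.find_min hP hm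
  -- injectivity of the chain up to d
  have haux : ∀ a b : Nat, a < b → b ≤ d → pvIter pf y a ≠ pvIter pf y b := by
    intro a b hab hbd heq
    have hz : pvIter pf (pvIter pf y a) (b - a) = pvIter pf y a := by
      calc pvIter pf (pvIter pf y a) (b - a) = pvIter pf y (a + (b - a)) := (pvIter_add pf a (b - a) y).symm
        _ = pvIter pf y b := by rw [show a + (b - a) = b from by omega]
        _ = pvIter pf y a := heq.symm
    have hdec : pvIter pf y d = pvIter pf y (a + (d - a) % (b - a)) := by
      have h2 : d - a = (d - a) / (b - a) * (b - a) + (d - a) % (b - a) := by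
        rw [Nat.mul_comm]
        exact (Nat.div_add_mod (d - a) (b - a)).symm
      calc pvIter pf y d = pvIter pf (pvIter pf y a) (d - a) := by rw [← pvIter_add]; congr 1; omega
        _ = pvIter pf (pvIter pf y a) ((d - a) / (b - a) * (b - a) + (d - a) % (b - a)) := by rw [← h2]
        _ = pvIter pf (pvIter pf y a) ((d - a) % (b - a)) := pvIter_periodic pf _ _ hz _ _
        _ = pvIter pf y (a + (d - a) % (b - a)) := (pvIter_add pf a _ y).symm
    have hlt : a + (d - a) % (b - a) < d := by
      have hmod : (d - a) % (b - a) < b - a := Nat.mod_lt _ (by omega)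
      omega
    apply hmin _ hlt
    show pvStep pf (pvIter pf y _) = pvIter pf y _
    rw [← hdec]
    exact hd
  -- pigeonhole: d + 1 distinct values in [0, length)
  have hF : Function.Injective (fun t : Fin (d + 1) =>
      (⟨(pvIter pf y t).toNat, by
        have := pvIter_range pf hb t y h0 h1
        omega⟩ : Fin pf.length)) := by
    intro t1 t2 heq
    simp only [Fin.mk.injEq] at heq
    have hr1 := pvIter_range pf hb t1 y h0 h1
    have hr2 := pvIter_range pf hb t2 y h0 h1
    have heq' : pvIter pf y t1 = pvIter pf y t2 := by omega
    by_contra hne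
    have hne' : (t1 : Nat) ≠ (t2 : Nat) := fun hc => hne (Fin.ext hc)
    rcases Nat.lt_or_ge (t1 : Nat) (t2 : Nat) with hlt | hge
    · exact haux t1 t2 hlt (by omega) heq'
    · have hlt2 : (t2 : Nat) < (t1 : Nat) := by omega
      exact haux t2 t1 hlt2 (by omega) heq'.symm
  have hcard : d + 1 ≤ pf.length := by
    simpa using Fintype.card_le_of_injective _ hF
  have hdle : d ≤ pf.length - 1 := by omega
  rw [pvIter_stab pf y d (pf.length - 1) hd hdle]
  exact hd

lemma pvRt_spec (pf : List Int) (y : Int) (hwf : pvWF pf) (h0 : 0 ≤ y) (h1 : y < pf.length) :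
    pvStep pf (pvRt pf y) = pvRt pf y ∧ pvIter pf y (pf.length - 1) = pvRt pf y := by
  have hreach := hwf.2 y h0 h1
  have hfix := pvReach_bound pf y hwf.1 h0 h1 hreach
  have hstab : pvIter pf y pf.length = pvIter pf y (pf.length - 1) :=
    pvIter_stab pf y (pf.length - 1) pf.length hfix (by omega)
  constructor
  · rw [pvRt, hstab]; exact hfix
  · rw [pvRt, hstab]

lemma pvRt_of_fix (pf : List Int) (r : Int) (h : pvStep pf r = r) : pvRt pf r = r :=
  pvIter_fix pf r h _

lemma pvIter_eq_rt (pf : List Int) (y : Int) (f : Nat) (hwf : pvWF pf)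
    (h0 : 0 ≤ y) (h1 : y < pf.length)
    (h : pvStep pf (pvIter pf y f) = pvIter pf y f) :
    pvIter pf y f = pvRt pf y :=
  pvIter_unique pf y f pf.length h (pvRt_spec pf y hwf h0 h1).1

lemma pvRt_step (pf : List Int) (x : Int) (hwf : pvWF pf)
    (h0 : 0 ≤ pvStep pf x) (h1 : pvStep pf x < pf.length) (hne : pvStep pf x ≠ x) :
    pvRt pf x = pvRt pf (pvStep pf x) := by
  have hlen : 1 ≤ pf.length := by omega
  have h2 := (pvRt_spec pf (pvStep pf x) hwf h0 h1).2
  rw [pvRt, show pf.length = (pf.length - 1) + 1 from by omega]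
  rw [show pvIter pf x (pf.length - 1 + 1) = pvIter pf (pvStep pf x) (pf.length - 1) from by
    simp [pvIter, hne]]
  exact h2

lemma pvRt_neg (pf : List Int) (x : Int) (hwf : pvWF pf)
    (h0 : -(pf.length : Int) ≤ x) (h1 : x < 0) :
    pvRt pf x = pvRt pf (x + pf.length) := by
  have hlen : 1 ≤ pf.length := by omega
  have hx2 : 0 ≤ x + (pf.length : Int) := by omega
  have hx3 : x + (pf.length : Int) < pf.length := by omega
  have hstep := pvStep_neg pf x h0 h1
  by_cases hc : pvStep pf (x + pf.length) = x + pf.length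
  · have hsx : pvStep pf x = x + pf.length := by rw [hstep, hc]
    have hne : pvStep pf x ≠ x := by rw [hsx]; omega
    have h1' : pvIter pf x 1 = x + pf.length := by
      show (if pvStep pf x = x then x else pvIter pf (pvStep pf x) 0) = x + pf.length
      rw [if_neg hne, hsx]; rfl
    have hfix1 : pvStep pf (pvIter pf x 1) = pvIter pf x 1 := by rw [h1']; exact hc
    rw [pvRt_of_fix pf _ hc, pvRt, pvIter_stab pf x 1 pf.length hfix1 (by omega), h1']
  · have hr := pvStep_range pf (x + pf.length) hwf.1 (by omega) hx3
    have hne : pvStep pf x ≠ x := by rw [hstep]; omega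
    rw [pvRt_step pf x hwf (by rw [hstep]; exact hr.1) (by rw [hstep]; exact hr.2) hne,
      pvRt_step pf (x + pf.length) hwf hr.1 hr.2 hc, hstep]

lemma pvRt_range (pf : List Int) (y : Int) (hwf : pvWF pf)
    (h0 : -(pf.length : Int) ≤ y) (h1 : y < pf.length) :
    0 ≤ pvRt pf y ∧ pvRt pf y < pf.length := by
  by_cases hy : 0 ≤ y
  · exact pvIter_range pf hwf.1 pf.length y hy h1
  · rw [pvRt_neg pf y hwf h0 (by omega)]
    exact pvIter_range pf hwf.1 pf.length (y + pf.length) (by omega) (by omega)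

-- writing a root r into cell c (either r is c's root, or c itself is a root)
lemma pvSet_core (pf : List Int) (c : Nat) (r : Int) (hwf : pvWF pf)
    (hc : c < pf.length) (hr0 : 0 ≤ r) (hr1 : r < pf.length) (hr : pvStep pf r = r)
    (hcr : r = pvRt pf (c : Int) ∨ pvStep pf (c : Int) = (c : Int)) :
    ∀ (f : Nat) (y : Int), 0 ≤ y → y < pf.length →
      pvStep pf (pvIter pf y f) = pvIter pf y f →
      ∃ g ≤ f + 1,
        pvStep (pf.set c r) (pvIter (pf.set c r) y g) = pvIter (pf.set c r) y g ∧
        pvIter (pf.set c r) y g =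
          (if pvIter pf y f = pvRt pf (c : Int) then r else pvIter pf y f) := by
  have hb := hwf.1
  have hc' : ((c : Int)) < ↑pf.length := by exact_mod_cast hc
  have hstep_set : ∀ k : Int, 0 ≤ k → k < ↑pf.length →
      pvStep (pf.set c r) k = if k = (c : Int) then r else pvStep pf k :=
    fun k hk0 hk1 => pvStep_set pf c r k hc hk0 hk1
  have hfixr' : pvStep (pf.set c r) r = r := by
    rcases eq_or_ne r (c : Int) with hrc | hrc
    · rw [hstep_set r hr0 hr1, if_pos hrc]
    · rw [hstep_set r hr0 hr1, if_neg hrc, hr]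
  have hroot : ∀ y : Int, 0 ≤ y → y < ↑pf.length → pvStep pf y = y →
      ∃ g, g ≤ 1 ∧
        pvStep (pf.set c r) (pvIter (pf.set c r) y g) = pvIter (pf.set c r) y g ∧
        pvIter (pf.set c r) y g = (if y = pvRt pf (c : Int) then r else y) := by
    intro y hy0 hy1 hfix
    by_cases hyc : y = (c : Int)
    · have hrtcc : pvRt pf (c : Int) = (c : Int) := by rw [← hyc, pvRt_of_fix pf y hfix, hyc]
      have hcond : y = pvRt pf (c : Int) := by rw [hrtcc, hyc]
      rcases eq_or_ne r y with hry | hry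
      · refine ⟨0, by omega, ?_, ?_⟩
        · show pvStep (pf.set c r) y = y
          rw [hstep_set y hy0 hy1, if_pos hyc, hry]
        · show y = _
          rw [if_pos hcond, hry]
      · have hstep' : pvStep (pf.set c r) y = r := by rw [hstep_set y hy0 hy1, if_pos hyc]
        have hit : pvIter (pf.set c r) y 1 = r := by
          rw [pvIter_succ, hstep', if_neg hry]
          rfl
        exact ⟨1, le_refl 1, by rw [hit]; exact hfixr', by rw [hit, if_pos hcond]⟩
    · have hstep' : pvStep (pf.set c r) y = y := by rw [hstep_set y hy0 hy1, if_neg hyc, hfix]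
      have hval : y = (if y = pvRt pf (c : Int) then r else y) := by
        rcases eq_or_ne y (pvRt pf (c : Int)) with hyr | hyr
        · rw [if_pos hyr]
          rcases hcr with hcr | hcr
          · rw [hcr, ← hyr]
          · exact absurd (by rw [hyr, pvRt_of_fix pf _ hcr]) hyc
        · rw [if_neg hyr]
      exact ⟨0, by omega, by show pvStep (pf.set c r) (pvIter (pf.set c r) y 0) = _; exact hstep', hval⟩
  intro f
  induction f with
  | zero =>
    intro y hy0 hy1 hfix
    obtain ⟨g, hg, h1, h2⟩ := hroot y hy0 hy1 hfix
    exact ⟨g, by omega, h1, h2⟩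
  | succ f ih =>
    intro y hy0 hy1 hfix
    by_cases hsy : pvStep pf y = y
    · have hiter : pvIter pf y (f + 1) = y := pvIter_fix pf y hsy _
      obtain ⟨g, hg, h1, h2⟩ := hroot y hy0 hy1 hsy
      exact ⟨g, by omega, h1, by rw [hiter]; exact h2⟩
    · have hpx := pvStep_range pf y hb (by omega) hy1
      have hiter : pvIter pf y (f + 1) = pvIter pf (pvStep pf y) f := by
        rw [pvIter_succ, if_neg hsy]
      have hfix' : pvStep pf (pvIter pf (pvStep pf y) f) = pvIter pf (pvStep pf y) f := by
        rw [← hiter]; exact hfix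
      by_cases hyc : y = (c : Int)
      · have hrcase : r = pvRt pf (c : Int) := by
          rcases hcr with h | h
          · exact h
          · exact absurd (by rw [hyc]; exact h) hsy
        have hcond : pvIter pf y (f + 1) = pvRt pf (c : Int) := by
          rw [pvIter_eq_rt pf y (f + 1) hwf hy0 hy1 hfix, hyc]
        have hstep' : pvStep (pf.set c r) y = r := by rw [hstep_set y hy0 hy1, if_pos hyc]
        rcases eq_or_ne r y with hry | hry
        · refine ⟨0, by omega, ?_, ?_⟩
          · show pvStep (pf.set c r) y = y
            rw [hstep', hry]
          · show y = _
            rw [if_pos hcond, hry]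
        · have hit : pvIter (pf.set c r) y 1 = r := by
            rw [pvIter_succ, hstep', if_neg hry]
            rfl
          exact ⟨1, by omega, by rw [hit]; exact hfixr', by rw [hit, if_pos hcond]⟩
      · have hstep' : pvStep (pf.set c r) y = pvStep pf y := by
          rw [hstep_set y hy0 hy1, if_neg hyc]
        obtain ⟨g, hg, h1, h2⟩ := ih (pvStep pf y) hpx.1 hpx.2 hfix'
        have hit : pvIter (pf.set c r) y (g + 1) = pvIter (pf.set c r) (pvStep pf y) g := by
          rw [pvIter_succ, hstep', if_neg hsy]
        exact ⟨g + 1, by omega, by rw [hit]; exact h1, by rw [hit, hiter]; exact h2⟩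

lemma pvSet_rt (pf : List Int) (c : Nat) (r : Int) (hwf : pvWF pf)
    (hc : c < pf.length) (hr0 : 0 ≤ r) (hr1 : r < pf.length) (hr : pvStep pf r = r)
    (hcr : r = pvRt pf (c : Int) ∨ pvStep pf (c : Int) = (c : Int)) :
    pvWF (pf.set c r) ∧ ∀ y : Int, 0 ≤ y → y < pf.length →
      pvRt (pf.set c r) y = (if pvRt pf y = pvRt pf (c : Int) then r else pvRt pf y) := by
  have hb := hwf.1
  have hlen : (pf.set c r).length = pf.length := by simp
  constructor
  · constructor
    · intro v hv
      rw [hlen]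
      rcases List.mem_or_eq_of_mem_set hv with hv' | hv'
      · exact hb v hv'
      · subst hv'; exact ⟨hr0, hr1⟩
    · intro k hk0 hk1
      rw [hlen] at hk1
      have hfixlen : pvStep pf (pvIter pf k pf.length) = pvIter pf k pf.length :=
        (pvRt_spec pf k hwf hk0 hk1).1
      obtain ⟨g, hg, h1, h2⟩ :=
        pvSet_core pf c r hwf hc hr0 hr1 hr hcr pf.length k hk0 hk1 hfixlen
      exact ⟨g, h1⟩
  · intro y hy0 hy1
    have hfix := pvRt_spec pf y hwf hy0 hy1
    have hfixm : pvStep pf (pvIter pf y (pf.length - 1)) = pvIter pf y (pf.length - 1) := by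
      rw [hfix.2]; exact hfix.1
    obtain ⟨g, hg, h1, h2⟩ :=
      pvSet_core pf c r hwf hc hr0 hr1 hr hcr (pf.length - 1) y hy0 hy1 hfixm
    have hlen1 : 1 ≤ pf.length := by omega
    have hrteq : pvRt (pf.set c r) y = pvIter (pf.set c r) y g := by
      rw [pvRt, hlen]
      exact pvIter_stab (pf.set c r) y g pf.length h1 (by omega)
    rw [hrteq, h2, hfix.2]

lemma pvSetD_neg {α : Type} (xs : List α) (i : Int) (v : α)
    (h0 : -(xs.length : Int) ≤ i) (h1 : i < 0) :
    PySem.List.pySetD xs i v = xs.set (xs.length - (-i).toNat) v := by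
  simp only [PySem.List.pySetD, PySem.List.pySet?, PySem.List.pyIdx?]
  rw [if_neg (by omega), if_pos (by omega)]
  rfl

lemma pvFindA_succ (f : Nat) (pf : List Int) (x : Int) :
    pvFindA (f + 1) pf x =
      if pvStep pf x = x then (pf, pvStep pf x)
      else (PySem.List.pySetD (pvFindA f pf (pvStep pf x)).1 x (pvFindA f pf (pvStep pf x)).2,
            (pvFindA f pf (pvStep pf x)).2) := rfl

lemma pvRt_fix_any (pf : List Int) (hwf : pvWF pf) (y : Int)
    (h0 : -(pf.length : Int) ≤ y) (h1 : y < pf.length) :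
    pvStep pf (pvRt pf y) = pvRt pf y := by
  by_cases hy : 0 ≤ y
  · exact (pvRt_spec pf y hwf hy h1).1
  · rw [pvRt_neg pf y hwf h0 (by omega)]
    exact (pvRt_spec pf (y + pf.length) hwf (by omega) (by omega)).1

lemma pvPres_any (pf pf' : List Int) (hwf : pvWF pf) (hwf' : pvWF pf')
    (hlen : pf'.length = pf.length)
    (hpres : ∀ y : Int, 0 ≤ y → y < ↑pf.length → pvRt pf' y = pvRt pf y) :
    ∀ y : Int, -(pf.length : Int) ≤ y → y < ↑pf.length → pvRt pf' y = pvRt pf y := by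
  intro y h0 h1
  by_cases hy : 0 ≤ y
  · exact hpres y hy h1
  · rw [pvRt_neg pf' y hwf' (by rw [hlen]; exact h0) (by omega),
      pvRt_neg pf y hwf h0 (by omega), hlen]
    exact hpres (y + pf.length) (by omega) (by omega)

-- find: returns the root, keeps the array well-formed, preserves every root
lemma pvFindA_ok (pf : List Int) (hwf : pvWF pf) :
    ∀ (f : Nat) (x : Int), 0 ≤ x → x < pf.length →
      pvStep pf (pvIter pf x f) = pvIter pf x f →
      (pvFindA (f + 1) pf x).2 = pvRt pf x ∧
      (pvFindA (f + 1) pf x).1.length = pf.length ∧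
      pvWF (pvFindA (f + 1) pf x).1 ∧
      ∀ y : Int, 0 ≤ y → y < pf.length →
        pvRt (pvFindA (f + 1) pf x).1 y = pvRt pf y := by
  intro f
  induction f with
  | zero =>
    intro x h0 h1 hfix
    have hsx : pvStep pf x = x := hfix
    rw [pvFindA_succ, if_pos hsx]
    exact ⟨by show pvStep pf x = pvRt pf x; rw [hsx, pvRt_of_fix pf x hsx], rfl, hwf,
      fun y _ _ => rfl⟩
  | succ f ih =>
    intro x h0 h1 hfix
    by_cases hsx : pvStep pf x = x
    · rw [pvFindA_succ, if_pos hsx]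
      exact ⟨by show pvStep pf x = pvRt pf x; rw [hsx, pvRt_of_fix pf x hsx], rfl, hwf,
        fun y _ _ => rfl⟩
    · rw [pvFindA_succ, if_neg hsx]
      have hpx := pvStep_range pf x hwf.1 (by omega) h1
      have hiter : pvIter pf x (f + 1) = pvIter pf (pvStep pf x) f := by
        rw [pvIter_succ, if_neg hsx]
      obtain ⟨hv1, hl1, hw1, hp1⟩ := ih (pvStep pf x) hpx.1 hpx.2 (by rw [← hiter]; exact hfix)
      have hrt_step : pvRt pf x = pvRt pf (pvStep pf x) := pvRt_step pf x hwf hpx.1 hpx.2 hsx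
      have hrrange := pvRt_range pf (pvStep pf x) hwf (by omega) hpx.2
      have hr0' : 0 ≤ (pvFindA (f + 1) pf (pvStep pf x)).2 := by rw [hv1]; exact hrrange.1
      have hr1' : (pvFindA (f + 1) pf (pvStep pf x)).2 < ↑(pvFindA (f + 1) pf (pvStep pf x)).1.length := by
        rw [hv1, hl1]; exact hrrange.2
      have hxlt : x.toNat < (pvFindA (f + 1) pf (pvStep pf x)).1.length := by rw [hl1]; omega
      have hfixr : pvStep (pvFindA (f + 1) pf (pvStep pf x)).1 (pvFindA (f + 1) pf (pvStep pf x)).2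
          = (pvFindA (f + 1) pf (pvStep pf x)).2 := by
        have h := (pvRt_spec (pvFindA (f + 1) pf (pvStep pf x)).1 (pvStep pf x) hw1 hpx.1
          (by rw [hl1]; exact hpx.2)).1
        rw [hp1 (pvStep pf x) hpx.1 hpx.2] at h
        rw [hv1]
        exact h
      have hcr : (pvFindA (f + 1) pf (pvStep pf x)).2
          = pvRt (pvFindA (f + 1) pf (pvStep pf x)).1 ((x.toNat : Nat) : Int) ∨
          pvStep (pvFindA (f + 1) pf (pvStep pf x)).1 ((x.toNat : Nat) : Int) = ((x.toNat : Nat) : Int) := by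
        left
        have hx' : ((x.toNat : Nat) : Int) = x := by omega
        rw [hx', hp1 x h0 h1, hrt_step]
        exact hv1
      obtain ⟨hwf2, hrt2⟩ := pvSet_rt (pvFindA (f + 1) pf (pvStep pf x)).1 x.toNat
        (pvFindA (f + 1) pf (pvStep pf x)).2 hw1 hxlt hr0' hr1' hfixr hcr
      have hsetd : PySem.List.pySetD (pvFindA (f + 1) pf (pvStep pf x)).1 x
          (pvFindA (f + 1) pf (pvStep pf x)).2
          = (pvFindA (f + 1) pf (pvStep pf x)).1.set x.toNat (pvFindA (f + 1) pf (pvStep pf x)).2 :=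
        PySem.List.pySetD_of_nonneg _ _ h0
      refine ⟨?_, ?_, ?_, ?_⟩
      · show (pvFindA (f + 1) pf (pvStep pf x)).2 = pvRt pf x
        rw [hv1, ← hrt_step]
      · show (PySem.List.pySetD _ _ _).length = pf.length
        rw [hsetd]
        simp [hl1]
      · show pvWF (PySem.List.pySetD _ _ _)
        rw [hsetd]
        exact hwf2
      · intro y hy0 hy1
        show pvRt (PySem.List.pySetD _ _ _) y = pvRt pf y
        rw [hsetd, hrt2 y hy0 (by rw [hl1]; exact hy1)]
        have hx' : ((x.toNat : Nat) : Int) = x := by omega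
        by_cases hcase : pvRt (pvFindA (f + 1) pf (pvStep pf x)).1 y
            = pvRt (pvFindA (f + 1) pf (pvStep pf x)).1 ((x.toNat : Nat) : Int)
        · rw [if_pos hcase]
          have : pvRt (pvFindA (f + 1) pf (pvStep pf x)).1 ((x.toNat : Nat) : Int)
              = pvRt pf x := by rw [hx']; exact hp1 x h0 h1
          rw [hv1, ← hrt_step]
          rw [this] at hcase
          rw [← hcase, hp1 y hy0 hy1]
        · rw [if_neg hcase]
          exact hp1 y hy0 hy1

lemma pvFindA_spec (pf : List Int) (x : Int) (hwf : pvWF pf)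
    (h0 : -(pf.length : Int) ≤ x) (h1 : x < pf.length) :
    (pvFindA (pf.length + 1) pf x).2 = pvRt pf x ∧
    (pvFindA (pf.length + 1) pf x).1.length = pf.length ∧
    pvWF (pvFindA (pf.length + 1) pf x).1 ∧
    ∀ y : Int, 0 ≤ y → y < pf.length →
      pvRt (pvFindA (pf.length + 1) pf x).1 y = pvRt pf y := by
  by_cases hx : 0 ≤ x
  · have hfix : pvStep pf (pvIter pf x pf.length) = pvIter pf x pf.length :=
      (pvRt_spec pf x hwf hx h1).1
    exact pvFindA_ok pf hwf pf.length x hx h1 hfix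
  · have hlen1 : 1 ≤ pf.length := by omega
    have hpx := pvStep_range pf x hwf.1 h0 (by omega)
    have hsx : pvStep pf x ≠ x := by omega
    have hfixm : pvStep pf (pvIter pf (pvStep pf x) (pf.length - 1))
        = pvIter pf (pvStep pf x) (pf.length - 1) := by
      rw [(pvRt_spec pf (pvStep pf x) hwf hpx.1 hpx.2).2]
      exact (pvRt_spec pf (pvStep pf x) hwf hpx.1 hpx.2).1
    obtain ⟨hv1, hl1, hw1, hp1⟩ := pvFindA_ok pf hwf (pf.length - 1) (pvStep pf x) hpx.1 hpx.2 hfixm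
    have hfe : pvFindA pf.length pf (pvStep pf x) = pvFindA (pf.length - 1 + 1) pf (pvStep pf x) := by
      rw [show pf.length - 1 + 1 = pf.length from by omega]
    rw [pvFindA_succ, if_neg hsx, hfe]
    have hrt_step : pvRt pf x = pvRt pf (pvStep pf x) := pvRt_step pf x hwf hpx.1 hpx.2 hsx
    have hrtneg : pvRt pf x = pvRt pf (x + pf.length) := pvRt_neg pf x hwf h0 (by omega)
    have hrrange := pvRt_range pf (pvStep pf x) hwf (by omega) hpx.2
    have hr0' : 0 ≤ (pvFindA (pf.length - 1 + 1) pf (pvStep pf x)).2 := by rw [hv1]; exact hrrange.1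
    have hr1' : (pvFindA (pf.length - 1 + 1) pf (pvStep pf x)).2
        < ↑(pvFindA (pf.length - 1 + 1) pf (pvStep pf x)).1.length := by
      rw [hv1, hl1]; exact hrrange.2
    have hsetd : PySem.List.pySetD (pvFindA (pf.length - 1 + 1) pf (pvStep pf x)).1 x
        (pvFindA (pf.length - 1 + 1) pf (pvStep pf x)).2
        = (pvFindA (pf.length - 1 + 1) pf (pvStep pf x)).1.set
            ((pvFindA (pf.length - 1 + 1) pf (pvStep pf x)).1.length - (-x).toNat)
            (pvFindA (pf.length - 1 + 1) pf (pvStep pf x)).2 :=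
      pvSetD_neg _ x _ (by rw [hl1]; exact h0) (by omega)
    have hclt : (pvFindA (pf.length - 1 + 1) pf (pvStep pf x)).1.length - (-x).toNat
        < (pvFindA (pf.length - 1 + 1) pf (pvStep pf x)).1.length := by
      rw [hl1]; omega
    have hccast : (((pvFindA (pf.length - 1 + 1) pf (pvStep pf x)).1.length - (-x).toNat : Nat) : Int)
        = x + pf.length := by
      rw [hl1]; omega
    have hfixr : pvStep (pvFindA (pf.length - 1 + 1) pf (pvStep pf x)).1
        (pvFindA (pf.length - 1 + 1) pf (pvStep pf x)).2
        = (pvFindA (pf.length - 1 + 1) pf (pvStep pf x)).2 := by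
      have h := (pvRt_spec (pvFindA (pf.length - 1 + 1) pf (pvStep pf x)).1 (pvStep pf x) hw1 hpx.1
        (by rw [hl1]; exact hpx.2)).1
      rw [hp1 (pvStep pf x) hpx.1 hpx.2] at h
      rw [hv1]
      exact h
    have hcr : (pvFindA (pf.length - 1 + 1) pf (pvStep pf x)).2
        = pvRt (pvFindA (pf.length - 1 + 1) pf (pvStep pf x)).1
            (((pvFindA (pf.length - 1 + 1) pf (pvStep pf x)).1.length - (-x).toNat : Nat) : Int) ∨
        pvStep (pvFindA (pf.length - 1 + 1) pf (pvStep pf x)).1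
            (((pvFindA (pf.length - 1 + 1) pf (pvStep pf x)).1.length - (-x).toNat : Nat) : Int)
          = (((pvFindA (pf.length - 1 + 1) pf (pvStep pf x)).1.length - (-x).toNat : Nat) : Int) := by
      left
      rw [hccast, hp1 (x + pf.length) (by omega) (by omega), ← hrtneg, hrt_step]
      exact hv1
    obtain ⟨hwf2, hrt2⟩ := pvSet_rt (pvFindA (pf.length - 1 + 1) pf (pvStep pf x)).1
      ((pvFindA (pf.length - 1 + 1) pf (pvStep pf x)).1.length - (-x).toNat)
      (pvFindA (pf.length - 1 + 1) pf (pvStep pf x)).2 hw1 hclt hr0' hr1' hfixr hcr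
    refine ⟨?_, ?_, ?_, ?_⟩
    · show (pvFindA (pf.length - 1 + 1) pf (pvStep pf x)).2 = pvRt pf x
      rw [hv1, ← hrt_step]
    · show (PySem.List.pySetD _ _ _).length = pf.length
      rw [hsetd]
      simp [hl1]
    · show pvWF (PySem.List.pySetD _ _ _)
      rw [hsetd]
      exact hwf2
    · intro y hy0 hy1
      show pvRt (PySem.List.pySetD _ _ _) y = pvRt pf y
      rw [hsetd, hrt2 y hy0 (by rw [hl1]; exact hy1)]
      have hkey : pvRt (pvFindA (pf.length - 1 + 1) pf (pvStep pf x)).1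
          (((pvFindA (pf.length - 1 + 1) pf (pvStep pf x)).1.length - (-x).toNat : Nat) : Int)
          = pvRt pf x := by
        rw [hccast, hp1 (x + pf.length) (by omega) (by omega), ← hrtneg]
      by_cases hcase : pvRt (pvFindA (pf.length - 1 + 1) pf (pvStep pf x)).1 y
          = pvRt (pvFindA (pf.length - 1 + 1) pf (pvStep pf x)).1
              (((pvFindA (pf.length - 1 + 1) pf (pvStep pf x)).1.length - (-x).toNat : Nat) : Int)
      · rw [if_pos hcase]
        rw [hkey] at hcase
        rw [hv1, ← hrt_step, ← hcase, hp1 y hy0 hy1]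
      · rw [if_neg hcase]
        exact hp1 y hy0 hy1

lemma pvUnionA_spec (pf : List Int) (i j : Int) (hwf : pvWF pf)
    (hi0 : -(pf.length : Int) ≤ i) (hi1 : i < pf.length)
    (hj0 : -(pf.length : Int) ≤ j) (hj1 : j < pf.length) :
    (pvUnionA pf i j).length = pf.length ∧ pvWF (pvUnionA pf i j) ∧
    ∀ y : Int, 0 ≤ y → y < pf.length →
      pvRt (pvUnionA pf i j) y =
        (if pvRt pf y = pvRt pf i then pvRt pf j else pvRt pf y) := by
  obtain ⟨hv1, hl1, hw1, hp1⟩ := pvFindA_spec pf j hwf hj0 hj1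
  have hfe : pvFindA (pf.length + 1) (pvFindA (pf.length + 1) pf j).1 i
      = pvFindA ((pvFindA (pf.length + 1) pf j).1.length + 1) (pvFindA (pf.length + 1) pf j).1 i := by
    rw [hl1]
  obtain ⟨hv2, hl2, hw2, hp2⟩ := pvFindA_spec (pvFindA (pf.length + 1) pf j).1 i hw1
    (by rw [hl1]; exact hi0) (by rw [hl1]; exact hi1)
  have hun : pvUnionA pf i j
      = PySem.List.pySetD (pvFindA ((pvFindA (pf.length + 1) pf j).1.length + 1) (pvFindA (pf.length + 1) pf j).1 i).1
          (pvFindA ((pvFindA (pf.length + 1) pf j).1.length + 1) (pvFindA (pf.length + 1) pf j).1 i).2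
          (pvFindA (pf.length + 1) pf j).2 := by
    show PySem.List.pySetD (pvFindA (pf.length + 1) (pvFindA (pf.length + 1) pf j).1 i).1
        (pvFindA (pf.length + 1) (pvFindA (pf.length + 1) pf j).1 i).2
        (pvFindA (pf.length + 1) pf j).2 = _
    rw [hfe]
  set F1 := pvFindA (pf.length + 1) pf j with hF1
  set F2 := pvFindA (F1.1.length + 1) F1.1 i with hF2
  have hp1a := pvPres_any pf F1.1 hwf hw1 hl1 hp1
  have hp2a : ∀ y : Int, -(pf.length : Int) ≤ y → y < ↑pf.length → pvRt F2.1 y = pvRt F1.1 y := by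
    have h := pvPres_any F1.1 F2.1 hw1 hw2 (by rw [hl2]) hp2
    intro y h0 h1
    exact h y (by rw [hl1]; exact h0) (by rw [hl1]; exact h1)
  have hpc : ∀ y : Int, -(pf.length : Int) ≤ y → y < ↑pf.length → pvRt F2.1 y = pvRt pf y :=
    fun y h0 h1 => (hp2a y h0 h1).trans (hp1a y h0 h1)
  have hrxv : F2.2 = pvRt pf i := by
    rw [hv2]
    exact hp1a i hi0 hi1
  have hryv : F1.2 = pvRt pf j := hv1
  have hri := pvRt_range pf i hwf hi0 hi1
  have hrj := pvRt_range pf j hwf hj0 hj1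
  have hl21 : F2.1.length = pf.length := by rw [hl2, hl1]
  have hsetd : PySem.List.pySetD F2.1 F2.2 F1.2 = F2.1.set F2.2.toNat F1.2 :=
    PySem.List.pySetD_of_nonneg _ _ (by rw [hrxv]; exact hri.1)
  have hclt : F2.2.toNat < F2.1.length := by rw [hl21]; omega
  have hccast : ((F2.2.toNat : Nat) : Int) = F2.2 := by omega
  have hr0' : 0 ≤ F1.2 := by rw [hryv]; exact hrj.1
  have hr1' : F1.2 < ↑F2.1.length := by rw [hryv, hl21]; exact hrj.2
  have hfixr : pvStep F2.1 F1.2 = F1.2 := by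
    have h := pvRt_fix_any F2.1 hw2 j (by rw [hl21]; exact hj0) (by rw [hl21]; exact hj1)
    rw [hpc j hj0 hj1, ← hryv] at h
    exact h
  have hfixrx : pvStep F2.1 F2.2 = F2.2 := by
    have h := pvRt_fix_any F2.1 hw2 i (by rw [hl21]; exact hi0) (by rw [hl21]; exact hi1)
    rw [hpc i hi0 hi1, ← hrxv] at h
    exact h
  have hcr : F1.2 = pvRt F2.1 ((F2.2.toNat : Nat) : Int) ∨
      pvStep F2.1 ((F2.2.toNat : Nat) : Int) = ((F2.2.toNat : Nat) : Int) := by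
    right
    rw [hccast]
    exact hfixrx
  obtain ⟨hwf3, hrt3⟩ := pvSet_rt F2.1 F2.2.toNat F1.2 hw2 hclt hr0' hr1' hfixr hcr
  have hrtc : pvRt F2.1 ((F2.2.toNat : Nat) : Int) = F2.2 := by
    rw [hccast]
    exact pvRt_of_fix F2.1 F2.2 hfixrx
  refine ⟨?_, ?_, ?_⟩
  · rw [hun, hsetd]
    simp [hl21]
  · rw [hun, hsetd]
    exact hwf3
  · intro y hy0 hy1
    rw [hun, hsetd, hrt3 y hy0 (by rw [hl21]; exact hy1)]
    rw [hrtc, hpc y (by omega) hy1, hrxv, ← hryv]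

-- labels array of B as a picture of A's roots
lemma pvGetD_labels (pf : List Int) (i : Int) (N : Nat) (hwf : pvWF pf) (hN : pf.length = N)
    (h0 : -(N : Int) ≤ i) (h1 : i < N) :
    PySem.List.pyGetD ((List.range N).map (fun k : Nat => pvRt pf (k : Int))) i 0 = pvRt pf i := by
  have hlen : ((List.range N).map (fun k : Nat => pvRt pf (k : Int))).length = N := by simp
  by_cases hi : 0 ≤ i
  · rw [PySem.List.pyGetD_eq_getElem _ _ hi (by rw [hlen]; exact h1)]
    have hlt : i.toNat < N := by omega
    simp only [List.getElem_map, List.getElem_range]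
    congr 1
    omega
  · have hip : -(pf.length : Int) ≤ i := by rw [hN]; exact h0
    rw [pvRt_neg pf i hwf hip (by omega), hN]
    have hk1 : 1 ≤ (-i).toNat := by omega
    have hk2 : (-i).toNat ≤ N := by omega
    rw [show i = -(((-i).toNat : Nat) : Int) from by omega]
    rw [PySem.List.pyGetD_neg_natCast _ _ 0 (by omega) (by rw [hlen]; omega)]
    simp only [List.getElem_map, List.getElem_range, List.length_map, List.length_range]
    congr 1
    omega

lemma pvLoop_inv (threshold : Int) (N : Nat) :
    ∀ (es : List (Int × Int × Int)) (pf : List Int),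
      pvWF pf → pf.length = N →
      (∀ e ∈ es, threshold ≤ e.2.2 →
        PySem.Raise.InRange N e.1 ∧ PySem.Raise.InRange N e.2.1) →
      (es.foldl (fun pf e => if threshold ≤ e.2.2 then pvUnionA pf e.1 e.2.1 else pf) pf).length = N ∧
      pvWF (es.foldl (fun pf e => if threshold ≤ e.2.2 then pvUnionA pf e.1 e.2.1 else pf) pf) ∧
      es.foldl
        (fun ls e =>
          if threshold ≤ e.2.2 then
            let a := PySem.List.pyGetD ls e.1 0
            let b := PySem.List.pyGetD ls e.2.1 0
            if a ≠ b then ls.map (fun l => if l = a then b else l) else ls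
          else ls)
        ((List.range N).map (fun k : Nat => pvRt pf (k : Int)))
      = (List.range N).map (fun k : Nat =>
          pvRt (es.foldl (fun pf e => if threshold ≤ e.2.2 then pvUnionA pf e.1 e.2.1 else pf) pf) (k : Int)) := by
  intro es
  induction es with
  | nil =>
    intro pf hwf hN _
    exact ⟨hN, hwf, rfl⟩
  | cons e es ih =>
    intro pf hwf hN hes
    have htl : ∀ e' ∈ es, threshold ≤ e'.2.2 →
        PySem.Raise.InRange N e'.1 ∧ PySem.Raise.InRange N e'.2.1 :=
      fun e' he' => hes e' (List.mem_cons_of_mem _ he')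
    by_cases hth : threshold ≤ e.2.2
    · obtain ⟨⟨hi0, hi1⟩, ⟨hj0, hj1⟩⟩ := hes e List.mem_cons_self hth
      have hi0' : -(pf.length : Int) ≤ e.1 := by rw [hN]; exact hi0
      have hi1' : e.1 < ↑pf.length := by rw [hN]; exact hi1
      have hj0' : -(pf.length : Int) ≤ e.2.1 := by rw [hN]; exact hj0
      have hj1' : e.2.1 < ↑pf.length := by rw [hN]; exact hj1
      obtain ⟨hlu, hwu, hru⟩ := pvUnionA_spec pf e.1 e.2.1 hwf hi0' hi1' hj0' hj1'
      have ha : PySem.List.pyGetD ((List.range N).map (fun k : Nat => pvRt pf (k : Int))) e.1 0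
          = pvRt pf e.1 := pvGetD_labels pf e.1 N hwf hN hi0 hi1
      have hb : PySem.List.pyGetD ((List.range N).map (fun k : Nat => pvRt pf (k : Int))) e.2.1 0
          = pvRt pf e.2.1 := pvGetD_labels pf e.2.1 N hwf hN hj0 hj1
      have hmapu : ∀ ls : List Int,
          ls = (List.range N).map (fun k : Nat => pvRt pf (k : Int)) →
          (if PySem.List.pyGetD ls e.1 0 ≠ PySem.List.pyGetD ls e.2.1 0 then
            ls.map (fun l => if l = PySem.List.pyGetD ls e.1 0 then PySem.List.pyGetD ls e.2.1 0 else l)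
          else ls)
          = (List.range N).map (fun k : Nat => pvRt (pvUnionA pf e.1 e.2.1) (k : Int)) := by
        intro ls hls
        subst hls
        rw [ha, hb]
        by_cases hab : pvRt pf e.1 = pvRt pf e.2.1
        · rw [if_neg (by simpa using hab)]
          apply List.map_congr_left
          intro k hk
          have hkN : k < N := List.mem_range.mp hk
          rw [hru (k : Int) (by omega) (by rw [hN]; exact_mod_cast hkN)]
          by_cases hc : pvRt pf (k : Int) = pvRt pf e.1
          · rw [if_pos hc, ← hab, ← hc]
          · rw [if_neg hc]
        · rw [if_pos (by simpa using hab)]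
          rw [List.map_map]
          apply List.map_congr_left
          intro k hk
          have hkN : k < N := List.mem_range.mp hk
          rw [hru (k : Int) (by omega) (by rw [hN]; exact_mod_cast hkN)]
          simp only [Function.comp]
      simp only [List.foldl_cons]
      simp only [hth, if_true]
      rw [hmapu _ rfl]
      exact ih (pvUnionA pf e.1 e.2.1) hwu (by rw [hlu, hN]) htl
    · simp only [List.foldl_cons]
      simp only [hth, if_false]
      exact ih pf hwf hN htl

lemma pvGroup_inv (items : List String) :
    ∀ (idxs : List Int) (pf : List Int) (d : PySem.Dict Int (PySem.Set String)),
      pvWF pf →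
      (∀ i ∈ idxs, 0 ≤ i ∧ i < pf.length) →
      (idxs.foldl
        (fun (st : List Int × PySem.Dict Int (PySem.Set String)) i =>
          let fr := pvFindA (st.1.length + 1) st.1 i
          (fr.1, st.2.modify fr.2 PySem.Set.empty
            (fun s => PySem.Set.add s (PySem.List.pyGetD items i ""))))
        (pf, d)).2
      = idxs.foldl
          (fun d i => d.modify (pvRt pf i) PySem.Set.empty
            (fun s => PySem.Set.add s (PySem.List.pyGetD items i "")))
          d := by
  intro idxs
  induction idxs with
  | nil => intro pf d _ _; rfl
  | cons i is ih =>
    intro pf d hwf hbd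
    obtain ⟨hi0, hi1⟩ := hbd i List.mem_cons_self
    have htl : ∀ i' ∈ is, 0 ≤ i' ∧ i' < ↑pf.length :=
      fun i' hi' => hbd i' (List.mem_cons_of_mem _ hi')
    obtain ⟨hv, hl, hw, hp⟩ := pvFindA_spec pf i hwf (by omega) hi1
    simp only [List.foldl_cons]
    rw [hv]
    have h1 := ih (pvFindA (pf.length + 1) pf i).1
      (d.modify (pvRt pf i) PySem.Set.empty
        (fun s => PySem.Set.add s (PySem.List.pyGetD items i "")))
      hw (fun i' hi' => ⟨(htl i' hi').1, by rw [hl]; exact (htl i' hi').2⟩)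
    rw [h1]
    apply PySem.List.foldl_congr_mem
    intro acc x hx
    rw [hp x (htl x hx).1 (htl x hx).2]

-- ===== VERDICT (by name: the statement is the Claim_ definition above) =====
theorem merge_observations_py_spec : Claim_equal_merge_observations_py := by
  intro items scores threshold _hdom hpre
  unfold Spec_merge_observations_py merge_observations_py merge_observations_py_alt
  simp only [PySem.List.len_eq]
  have hp0 : PySem.List.pyRange 0 (items.length : Int) 1
      = (List.range items.length).map (fun k : Nat => (k : Int)) := by
    rw [PySem.List.pyRange_one]
    simp
  have hlen0 : (PySem.List.pyRange 0 (items.length : Int) 1).length = items.length := by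
    rw [hp0]; simp
  have hstep0 : ∀ k : Int, 0 ≤ k → k < (items.length : Int) →
      pvStep (PySem.List.pyRange 0 (items.length : Int) 1) k = k := by
    intro k hk0 hk1
    have hk : k.toNat < (PySem.List.pyRange 0 (items.length : Int) 1).length := by
      rw [hlen0]; omega
    rw [pvStep, PySem.List.pyGetD_eq_getElem _ _ hk0 (by rw [hlen0]; exact hk1),
      PySem.List.getElem_pyRange_one 0 (items.length : Int) k.toNat hk]
    omega
  have hwf0 : pvWF (PySem.List.pyRange 0 (items.length : Int) 1) := by
    constructor
    · intro v hv
      have := PySem.List.mem_pyRange_one.mp hv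
      rw [hlen0]
      exact this
    · intro k hk0 hk1
      rw [hlen0] at hk1
      exact ⟨0, hstep0 k hk0 hk1⟩
  have hrt0 : ∀ k : Nat, k < items.length → pvRt (PySem.List.pyRange 0 (items.length : Int) 1) (k : Int) = (k : Int) := by
    intro k hk
    exact pvRt_of_fix _ _ (hstep0 (k : Int) (by omega) (by exact_mod_cast hk))
  have hlab0 : PySem.List.pyRange 0 (items.length : Int) 1
      = (List.range items.length).map (fun k : Nat => pvRt (PySem.List.pyRange 0 (items.length : Int) 1) (k : Int)) := by
    conv_lhs => rw [hp0]
    apply List.map_congr_left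
    intro k hk
    exact (hrt0 k (List.mem_range.mp hk)).symm
  obtain ⟨hlenF, hwfF, hlabF⟩ := pvLoop_inv threshold items.length scores
    (PySem.List.pyRange 0 (items.length : Int) 1) hwf0 hlen0 hpre
  set pfF := scores.foldl (fun pf e => if threshold ≤ e.2.2 then pvUnionA pf e.1 e.2.1 else pf)
    (PySem.List.pyRange 0 (items.length : Int) 1) with hpfF
  -- A side: reduce the grouping loop to a fold keyed by roots of pfF
  have hA := pvGroup_inv items (PySem.List.pyRange 0 (items.length : Int) 1) pfF PySem.Dict.empty hwfF
    (by
      intro i hi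
      have := PySem.List.mem_pyRange_one.mp hi
      rw [hlenF]
      exact this)
  -- B side: the final labels are the roots of pfF
  have hlabB : scores.foldl
      (fun ls e =>
        if threshold ≤ e.2.2 then
          let a := PySem.List.pyGetD ls e.1 0
          let b := PySem.List.pyGetD ls e.2.1 0
          if a ≠ b then ls.map (fun l => if l = a then b else l) else ls
        else ls)
      (PySem.List.pyRange 0 (items.length : Int) 1)
      = (List.range items.length).map (fun k : Nat => pvRt pfF (k : Int)) := by
    conv_lhs => rw [hlab0]
    exact hlabF
  rw [hA, hlabB]
  -- now rewrite B's enumerate-fold into the same fold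
  rw [PySem.List.enumerate_eq_map_pyRange _ (0 : Int), List.foldl_map]
  have hlenL : PySem.List.len ((List.range items.length).map (fun k : Nat => pvRt pfF (k : Int)))
      = (items.length : Int) := by
    simp [PySem.List.len_eq]
  rw [hlenL]
  congr 1
  apply PySem.List.foldl_congr_mem
  intro acc j hj
  have hjr := PySem.List.mem_pyRange_one.mp hj
  rw [pvGetD_labels pfF j items.length hwfF hlenF (by omega) hjr.2]
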